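-- pv_equiv track=rewrite | github.com/cdestradab/HackerRank---Python | challenge22.py | genMat
-- ===== SOURCE A (Python) =====
-- def genMat(n,m,pattern, background, message):
--     newMat = ""
--     midPattern = int(((n-1)/2))
--
--     for i in range(0, midPattern):
--         newMat = newMat + (pattern*((i*2)+1)).center(m, background) + '\n';
--
--     newMat = newMat + message.center(m, background) + '\n';
--
--     for i in range(midPattern, 0, -1):
--         newMat = newMat + (pattern*((i*2)-1)).center(m, background) + '\n';
--
--     return newMat;
-- ===== SOURCE B (Python) =====
-- def genMat(n, m, pattern, background, message):
--     mid = int((n - 1) / 2)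
--
--     def wrap(i):
--         # recursively build the mat from the outside in: each pattern row is
--         # computed once and placed on both sides of the inner mat
--         if i >= mid:
--             return message.center(m, background) + '\n'
--         row = (pattern * (2 * i + 1)).center(m, background) + '\n'
--         return row + wrap(i + 1) + row
--
--     return wrap(0)
-- ===== Notes on version B (the rewrite author's own statement) =====
-- stated objective: alternative
-- what changed: B builds the mat recursively from the outside in: wrap(i) computes each pattern row once and places it on both sides of the recursively built inner mat, replacing A's two separate iterative generating loops.
import Mathlib
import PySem

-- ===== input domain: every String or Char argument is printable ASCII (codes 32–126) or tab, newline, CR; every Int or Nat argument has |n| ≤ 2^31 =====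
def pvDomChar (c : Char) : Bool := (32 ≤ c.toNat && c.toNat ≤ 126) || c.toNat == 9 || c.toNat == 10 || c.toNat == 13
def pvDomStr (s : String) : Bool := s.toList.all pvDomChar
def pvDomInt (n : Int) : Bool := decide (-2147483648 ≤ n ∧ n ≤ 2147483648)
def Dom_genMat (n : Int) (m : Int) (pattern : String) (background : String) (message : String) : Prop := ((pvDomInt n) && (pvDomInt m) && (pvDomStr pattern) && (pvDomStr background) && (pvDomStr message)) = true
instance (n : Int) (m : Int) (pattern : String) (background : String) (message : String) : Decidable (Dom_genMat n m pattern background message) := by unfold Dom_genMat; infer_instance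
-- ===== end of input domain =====

-- B builds the mat recursively from the outside in (each pattern row computed once,
-- placed on both sides of the inner mat) instead of A's two generating loops.

-- ===== PORT A =====
-- s * k on strings (k clamped at 0, as in Python); exact transliteration on List Char
def pvRep (s : List Char) (k : Int) : List Char := (List.replicate k.toNat s).flatten

-- s.center(width, fill) ported by hand (CPython: marg = width - len(s); if marg <= 0
-- return s; left = marg//2 + (marg & width & 1)); exact for a one-char fill.
def pvCenter (s : List Char) (width : Int) (fill : Char) : List Char :=
  if width ≤ (s.length : Int) then s
  else
    let w := (width - s.length).toNat
    let left := w / 2 + (w % 2) * (width.toNat % 2)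
    List.replicate left fill ++ s ++ List.replicate (w - left) fill

def genMat (n : Int) (m : Int) (pattern : String) (background : String) (message : String) : String :=
  -- Pre_ guarantees background is one character (else Python's center raises TypeError)
  let fill := background.toList.headD ' '
  -- int(((n-1)/2)): exact float division by 2 then truncation toward zero
  let midPattern := Int.tdiv (n - 1) 2
  let s1 := (PySem.List.pyRange 0 midPattern 1).foldl
    (fun acc i => acc ++ pvCenter (pvRep pattern.toList (i * 2 + 1)) m fill ++ ['\n']) []
  let s2 := s1 ++ pvCenter message.toList m fill ++ ['\n']
  let s3 := (PySem.List.pyRange midPattern 0 (-1)).foldl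
    (fun acc i => acc ++ pvCenter (pvRep pattern.toList (i * 2 - 1)) m fill ++ ['\n']) s2
  String.ofList s3

-- ===== PORT B =====
-- wrap(i) from Source B: recursion on the distance to the middle row
def pvWrap (pat msg : List Char) (m : Int) (fill : Char) (mid i : Int) : List Char :=
  if i ≥ mid then pvCenter msg m fill ++ ['\n']
  else
    let row := pvCenter (pvRep pat (2 * i + 1)) m fill ++ ['\n']
    row ++ pvWrap pat msg m fill mid (i + 1) ++ row
termination_by (mid - i).toNat
decreasing_by omega

def genMat_alt (n : Int) (m : Int) (pattern : String) (background : String) (message : String) : String :=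
  let fill := background.toList.headD ' '
  let mid := Int.tdiv (n - 1) 2
  String.ofList (pvWrap pattern.toList message.toList m fill mid 0)

-- ===== PRECONDITION & SPEC =====
-- Pre_ excludes exactly the inputs where Python's str.center raises TypeError:
-- background must be a single character.
def Pre_genMat (n : Int) (m : Int) (pattern : String) (background : String) (message : String) : Prop :=
  background.toList.length = 1
instance (n : Int) (m : Int) (pattern : String) (background : String) (message : String) : Decidable (Pre_genMat n m pattern background message) := by unfold Pre_genMat; infer_instance
def pvWitness_genMat : Int × Int × String × String × String := (7, 9, "x", "-", "HI")

def Spec_genMat (n : Int) (m : Int) (pattern : String) (background : String) (message : String) (out : String) : Prop := out = genMat_alt n m pattern background message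
instance (n : Int) (m : Int) (pattern : String) (background : String) (message : String) (out : String) : Decidable (Spec_genMat n m pattern background message out) := by unfold Spec_genMat; infer_instance

-- ===== CLAIM (what is proved, stated in full; the proofs are below) =====
def Claim_equal_genMat : Prop := ∀ (n : Int) (m : Int) (pattern : String) (background : String) (message : String), Dom_genMat n m pattern background message → Pre_genMat n m pattern background message → Spec_genMat n m pattern background message (genMat n m pattern background message)

-- ===== LEMMAS AND PROOFS =====

-- a row-appending fold is the flattened map of the rows
theorem pvFoldlRows (l : List Int) (f : Int → List Char) (acc : List Char) :
    l.foldl (fun a i => a ++ f i ++ ['\n']) acc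
      = acc ++ (l.map (fun i => f i ++ ['\n'])).flatten := by
  induction l generalizing acc with
  | nil => simp
  | cons x xs ih => rw [List.foldl_cons, ih]; simp [List.append_assoc]

-- the descending rows are the reverse of the ascending rows
theorem pvMirror (mid : Int) (g : Int → List Char) :
    (PySem.List.pyRange mid 0 (-1)).map (fun i => g (i * 2 - 1))
      = ((PySem.List.pyRange 0 mid 1).map (fun i => g (2 * i + 1))).reverse := by
  rw [PySem.List.pyRange_neg_one_eq_reverse, List.map_reverse]
  congr 1
  rw [PySem.List.pyRange_one, PySem.List.pyRange_one, List.map_map, List.map_map]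
  have h : (mid + 1 - (0 + 1)).toNat = (mid - 0).toNat := by omega
  rw [h]
  apply List.map_congr_left
  intro k _
  have h2 : (1 + (k : Int)) * 2 - 1 = 2 * (k : Int) + 1 := by ring
  simp [Function.comp, h2]

-- B's recursive wrap equals the flattened mirrored row list
theorem pvWrap_eq (pat msg : List Char) (m : Int) (fill : Char) (mid i : Int) :
    pvWrap pat msg m fill mid i
      = ((PySem.List.pyRange i mid 1).map
          (fun j => pvCenter (pvRep pat (2 * j + 1)) m fill ++ ['\n'])).flatten
        ++ (pvCenter msg m fill ++ ['\n'])
        ++ (((PySem.List.pyRange i mid 1).map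
          (fun j => pvCenter (pvRep pat (2 * j + 1)) m fill ++ ['\n'])).reverse).flatten := by
  rw [pvWrap]
  by_cases h : i ≥ mid
  · rw [if_pos h, PySem.List.pyRange_one_eq_nil h]; simp
  · rw [if_neg h, PySem.List.pyRange_one_cons (by omega)]
    rw [pvWrap_eq pat msg m fill mid (i + 1)]
    simp [List.flatten_append, List.append_assoc]
termination_by (mid - i).toNat
decreasing_by omega

-- ===== VERDICT (by name: the statement is the Claim_ definition above) =====
theorem genMat_spec : Claim_equal_genMat := by
  intro n m pattern background message _ _
  unfold Spec_genMat genMat genMat_alt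
  apply congrArg String.ofList
  rw [pvFoldlRows, pvFoldlRows,
      pvMirror (Int.tdiv (n - 1) 2) (fun j => pvCenter (pvRep pattern.toList j) m (background.toList.headD ' ') ++ ['\n']),
      pvWrap_eq]
  have hmap : ((PySem.List.pyRange 0 (Int.tdiv (n - 1) 2) 1).map
      (fun i => pvCenter (pvRep pattern.toList (i * 2 + 1)) m (background.toList.headD ' ') ++ ['\n']))
    = ((PySem.List.pyRange 0 (Int.tdiv (n - 1) 2) 1).map
      (fun j => pvCenter (pvRep pattern.toList (2 * j + 1)) m (background.toList.headD ' ') ++ ['\n'])) := by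
    apply List.map_congr_left; intro j _; simp [Int.mul_comm]
  rw [hmap]
  simp [List.append_assoc]
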